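-- pv_equiv track=rewrite | github.com/melcoloy/kkbox | Projet_Gradio.py | generer_emplacements
-- ===== SOURCE A (Python) =====
-- def generer_emplacements(largeur_grille, hauteur_grille):
--     # 1. Création d'une grille mémoire pour savoir quelles cases sont déjà occupées
--     # False = vide, True = occupé
--     grille_occupee = [[False for _ in range(largeur_grille)] for _ in range(hauteur_grille)]
--
--     emplacements = []
--
--     # 2. Parcours de la grille (de gauche à droite, puis de haut en bas)
--     for y in range(hauteur_grille):
--         for x in range(largeur_grille):
--
--             # Si la case est déjà prise par un précédent domino, on passe
--             if grille_occupee[y][x]: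
--                 continue
--
--             # 3. Tentative de placement horizontal (vers la droite)
--             # On vérifie qu'on ne sort pas de l'image ET que la case de droite est libre
--             if x + 1 < largeur_grille and not grille_occupee[y][x + 1]:
--                 emplacements.append(((x, y), (x + 1, y)))
--                 grille_occupee[y][x] = True
--                 grille_occupee[y][x + 1] = True
--
--             # 4. Tentative de placement vertical (vers le bas)
--             # Si on ne peut pas aller à droite (bord de l'image), on va en bas
--             elif y + 1 < hauteur_grille and not grille_occupee[y + 1][x]:
--                 emplacements.append(((x, y), (x, y + 1)))
--                 grille_occupee[y][x] = True
--                 grille_occupee[y + 1][x] = True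
--
--             else:
--                 # Sécurité : Si on arrive ici, c'est que la grille est impaire et invalide
--                 raise ValueError(f"Impossible de paver la case ({x}, {y}). La grille est mal dimensionnée.")
--
--     return emplacements
-- ===== SOURCE B (Python) =====
-- def generer_emplacements(largeur_grille, hauteur_grille):
--     # Grid-free parity construction: each row is horizontals 0-1,2-3,...;
--     # an odd width leaves the last column, covered by vertical dominoes
--     # started on even rows.
--     emplacements = []
--     for y in range(hauteur_grille):
--         for x in range(0, largeur_grille - 1, 2):
--             emplacements.append(((x, y), (x + 1, y)))
--         if largeur_grille > 0 and largeur_grille % 2 == 1 and y % 2 == 0: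
--             if y + 1 < hauteur_grille:
--                 emplacements.append(((largeur_grille - 1, y), (largeur_grille - 1, y + 1)))
--             else:
--                 raise ValueError(f"Impossible de paver la case ({largeur_grille - 1}, {y}). La grille est mal dimensionnée.")
--     return emplacements
-- ===== Notes on version B (the rewrite author's own statement) =====
-- stated objective: simpler
-- what changed: B drops A's grille_occupee occupancy grid and its cell-by-cell scan entirely and emits the placements directly from parity: per row the horizontal dominoes at x = 0,2,..., plus, for odd width, the last-column vertical domino started on even rows; the raise condition (both dimensions positive and odd) is excluded by Pre_ and B raises the identical ValueError there.
-- outside the precondition, e.g. on generer_emplacements(3, 3): A raises ValueError, B raises ValueError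
import Mathlib
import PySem

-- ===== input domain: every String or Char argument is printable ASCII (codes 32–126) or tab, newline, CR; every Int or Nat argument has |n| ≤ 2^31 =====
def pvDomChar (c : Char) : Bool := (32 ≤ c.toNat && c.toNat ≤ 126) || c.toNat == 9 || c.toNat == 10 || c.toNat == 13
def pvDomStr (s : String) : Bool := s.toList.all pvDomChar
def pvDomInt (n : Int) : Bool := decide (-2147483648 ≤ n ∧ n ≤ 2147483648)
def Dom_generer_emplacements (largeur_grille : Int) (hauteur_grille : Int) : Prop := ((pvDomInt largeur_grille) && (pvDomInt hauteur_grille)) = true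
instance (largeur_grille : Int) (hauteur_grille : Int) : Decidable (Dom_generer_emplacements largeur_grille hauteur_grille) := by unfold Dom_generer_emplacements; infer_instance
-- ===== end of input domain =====

-- B drops A's occupancy grid and emits the tiling directly from parity (same
-- return value and same ValueError raises; raises are excluded by Pre_ below).

-- ===== PORT A =====
-- grille_occupee[y][x]  (read; every use in the loop is in range)
def pvCell (g : List (List Bool)) (y x : Int) : Bool :=
  PySem.List.pyGetD (PySem.List.pyGetD g y []) x false

-- grille_occupee[y][x] = True  (in-place row update; every use is in range, where pySetD is exact)
def pvSetCell (g : List (List Bool)) (y x : Int) : List (List Bool) :=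
  PySem.List.pySetD g y (PySem.List.pySetD (PySem.List.pyGetD g y []) x true)

-- body of A's inner loop over x
def stepAx (largeur_grille hauteur_grille y : Int)
    (st : List (List Bool) × List ((Int × Int) × (Int × Int))) (x : Int) :
    List (List Bool) × List ((Int × Int) × (Int × Int)) :=
  if pvCell st.1 y x then st
  else if x + 1 < largeur_grille ∧ pvCell st.1 y (x + 1) = false then
    (pvSetCell (pvSetCell st.1 y x) y (x + 1), st.2 ++ [((x, y), (x + 1, y))])
  else if y + 1 < hauteur_grille ∧ pvCell st.1 (y + 1) x = false then
    (pvSetCell (pvSetCell st.1 y x) (y + 1) x, st.2 ++ [((x, y), (x, y + 1))])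
  else st  -- Python: raise ValueError(...); these inputs are excluded by Pre_

def generer_emplacements (largeur_grille : Int) (hauteur_grille : Int) :
    List ((Int × Int) × (Int × Int)) :=
  let grille_occupee : List (List Bool) :=
    (PySem.List.pyRange 0 hauteur_grille 1).map
      (fun _ => (PySem.List.pyRange 0 largeur_grille 1).map (fun _ => false))
  ((PySem.List.pyRange 0 hauteur_grille 1).foldl
    (fun st y => (PySem.List.pyRange 0 largeur_grille 1).foldl
        (stepAx largeur_grille hauteur_grille y) st)
    (grille_occupee, [])).2

-- ===== PORT B =====
def generer_emplacements_alt (largeur_grille : Int) (hauteur_grille : Int) :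
    List ((Int × Int) × (Int × Int)) :=
  (PySem.List.pyRange 0 hauteur_grille 1).foldl
    (fun emplacements y =>
      let emplacements :=
        (PySem.List.pyRange 0 (largeur_grille - 1) 2).foldl
          (fun acc x => acc ++ [((x, y), (x + 1, y))]) emplacements
      if 0 < largeur_grille ∧ PySem.Int.mod largeur_grille 2 = 1 ∧ PySem.Int.mod y 2 = 0 then
        if y + 1 < hauteur_grille then
          emplacements ++ [((largeur_grille - 1, y), (largeur_grille - 1, y + 1))]
        else emplacements  -- Python: raise ValueError(...); excluded by Pre_
      else emplacements)
    []

-- ===== PRECONDITION & SPEC =====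
-- Pre_ excludes exactly the inputs where A raises ValueError: both dimensions positive and odd
-- (the grid has odd area and cannot be tiled).  B raises the identical ValueError there.
def Pre_generer_emplacements (largeur_grille : Int) (hauteur_grille : Int) : Prop :=
  ¬ (0 < largeur_grille ∧ 0 < hauteur_grille ∧
     largeur_grille % 2 = 1 ∧ hauteur_grille % 2 = 1)
instance (largeur_grille : Int) (hauteur_grille : Int) : Decidable (Pre_generer_emplacements largeur_grille hauteur_grille) := by unfold Pre_generer_emplacements; infer_instance
def pvWitness_generer_emplacements : Int × Int := (4, 3)

def Spec_generer_emplacements (largeur_grille : Int) (hauteur_grille : Int) (out : List ((Int × Int) × (Int × Int))) : Prop := out = generer_emplacements_alt largeur_grille hauteur_grille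
instance (largeur_grille : Int) (hauteur_grille : Int) (out : List ((Int × Int) × (Int × Int))) : Decidable (Spec_generer_emplacements largeur_grille hauteur_grille out) := by unfold Spec_generer_emplacements; infer_instance

-- ===== CLAIM (what is proved, stated in full; the proofs are below) =====
def Claim_equal_generer_emplacements : Prop := ∀ (largeur_grille : Int) (hauteur_grille : Int), Dom_generer_emplacements largeur_grille hauteur_grille → Pre_generer_emplacements largeur_grille hauteur_grille → Spec_generer_emplacements largeur_grille hauteur_grille (generer_emplacements largeur_grille hauteur_grille)

-- ===== LEMMAS AND PROOFS =====

-- abstract grid: a h×w list-of-lists described by an occupancy function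
def gF (w h : Int) (occ : Int → Int → Bool) : List (List Bool) :=
  (PySem.List.pyRange 0 h 1).map (fun i => (PySem.List.pyRange 0 w 1).map (fun j => occ i j))

-- A's grid state while scanning row y at column a: rows < y full, row y filled below a,
-- last column of row y occupied iff lst (by the vertical domino from row y-1)
def occR (w y a : Int) (lst : Bool) : Int → Int → Bool :=
  fun i j => if i < y then true
    else if i = y then (decide (j < a) || (lst && decide (j = w - 1)))
    else false

-- what B appends for row y
def rowOut (w h y : Int) : List ((Int × Int) × (Int × Int)) :=
  (PySem.List.pyRange 0 (w - 1) 2).map (fun x => ((x, y), (x + 1, y))) ++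
    (if w % 2 = 1 ∧ y % 2 = 0 ∧ y + 1 < h then [((w - 1, y), (w - 1, y + 1))] else [])

theorem gF_congr {w h : Int} {o1 o2 : Int → Int → Bool}
    (hocc : ∀ i j, 0 ≤ i → i < h → 0 ≤ j → j < w → o1 i j = o2 i j) :
    gF w h o1 = gF w h o2 := by
  unfold gF
  refine List.map_congr_left (fun i hi => List.map_congr_left (fun j hj => ?_))
  rw [PySem.List.mem_pyRange_one] at hi hj
  exact hocc i j hi.1 hi.2 hj.1 hj.2

theorem cell_gF (w h : Int) (occ : Int → Int → Bool) (y x : Int)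
    (hy0 : 0 ≤ y) (hyh : y < h) (hx0 : 0 ≤ x) (hxw : x < w) :
    pvCell (gF w h occ) y x = occ y x := by
  unfold pvCell gF
  rw [PySem.List.pyGetD_map_pyRange_of_nonneg _ _ _ _ hy0 hyh,
      PySem.List.pyGetD_map_pyRange_of_nonneg _ _ _ _ hx0 hxw]

theorem set_map_pyRange {α : Type} (f : Int → α) (n x : Int) (v : α)
    (hx0 : 0 ≤ x) (hxn : x < n) :
    ((PySem.List.pyRange 0 n 1).map f).set x.toNat v
      = (PySem.List.pyRange 0 n 1).map (fun i => if i = x then v else f i) := by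
  apply List.ext_getElem
  · simp
  · intro m h1 h2
    simp only [List.getElem_set, List.getElem_map]
    rw [PySem.List.getElem_pyRange_one (h := by simpa using h2)]
    simp only [zero_add]
    by_cases hm : x.toNat = m
    · rw [if_pos hm, if_pos (by omega)]
    · rw [if_neg hm, if_neg (by omega)]

theorem set_gF (w h : Int) (occ : Int → Int → Bool) (y x : Int)
    (hy0 : 0 ≤ y) (hyh : y < h) (hx0 : 0 ≤ x) (hxw : x < w) :
    pvSetCell (gF w h occ) y x
      = gF w h (fun i j => if i = y ∧ j = x then true else occ i j) := by
  unfold pvSetCell gF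
  rw [PySem.List.pyGetD_map_pyRange_of_nonneg _ _ _ _ hy0 hyh,
      PySem.List.pySetD_of_nonneg _ _ hx0,
      set_map_pyRange _ _ _ _ hx0 hxw,
      PySem.List.pySetD_of_nonneg _ _ hy0,
      set_map_pyRange _ _ _ _ hy0 hyh]
  refine List.map_congr_left (fun i hi => ?_)
  rw [PySem.List.mem_pyRange_one] at hi
  by_cases hiy : i = y
  · subst hiy
    rw [if_pos rfl]
    refine List.map_congr_left (fun j hj => ?_)
    beta_reduce
    by_cases hjx : j = x
    · rw [if_pos hjx, if_pos ⟨rfl, hjx⟩]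
    · rw [if_neg hjx, if_neg (by tauto)]
  · rw [if_neg hiy]
    refine List.map_congr_left (fun j hj => ?_)
    beta_reduce
    rw [if_neg (by tauto)]

-- range-with-step-2 facts
theorem pyRange_two_nil (a b : Int) (h : b ≤ a) : PySem.List.pyRange a b 2 = [] := by
  rw [PySem.List.pyRange_of_pos a b (by norm_num), if_neg (by omega)]
  simp

theorem pyRange_two_cons (a b : Int) (h : a < b) :
    PySem.List.pyRange a b 2 = a :: PySem.List.pyRange (a + 2) b 2 := by
  rw [PySem.List.pyRange_of_pos a b (by norm_num),
      PySem.List.pyRange_of_pos (a + 2) b (by norm_num)]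
  by_cases h2 : a + 2 < b
  · rw [if_pos h, if_pos h2]
    have hcount : ((b - a + 2 - 1) / 2).toNat = ((b - (a + 2) + 2 - 1) / 2).toNat + 1 := by
      omega
    rw [hcount, List.range_succ_eq_map]
    simp only [List.map_cons, List.map_map]
    refine congrArg₂ _ (by ring) (List.map_congr_left (fun k _ => ?_))
    simp only [Function.comp_apply]
    push_cast
    ring
  · rw [if_pos h, if_neg h2]
    have hcount : ((b - a + 2 - 1) / 2).toNat = 1 := by omega
    rw [hcount]
    simp

theorem pyRange_horiz (w : Int) (hw : 0 < w) :
    PySem.List.pyRange 0 (w - w % 2) 2 = PySem.List.pyRange 0 (w - 1) 2 := by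
  rw [PySem.List.pyRange_of_pos _ _ (by norm_num : (0:Int) < 2),
      PySem.List.pyRange_of_pos _ _ (by norm_num : (0:Int) < 2)]
  refine congrArg _ (congrArg _ ?_)
  split_ifs <;> omega

-- A's inner loop places the horizontals of row y, two columns at a time
theorem innerH (w h y : Int) (hy0 : 0 ≤ y) (hyh : y < h)
    (lst : Bool) (hlst : lst = true → w % 2 = 1) :
    ∀ (k : Nat) (a : Int), 0 ≤ a → a + 2 * (k : Int) = w - w % 2 →
    ∀ emps, (PySem.List.pyRange a w 1).foldl (stepAx w h y) (gF w h (occR w y a lst), emps)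
      = (PySem.List.pyRange (w - w % 2) w 1).foldl (stepAx w h y)
          (gF w h (occR w y (w - w % 2) lst),
           emps ++ (PySem.List.pyRange a (w - w % 2) 2).map (fun x => ((x, y), (x + 1, y)))) := by
  intro k
  induction k with
  | zero =>
      intro a ha0 hae emps
      have hae' : a = w - w % 2 := by omega
      subst hae'
      rw [pyRange_two_nil _ _ le_rfl]
      simp
  | succ k ih =>
      intro a ha0 hae emps
      have hmod : w % 2 = 0 ∨ w % 2 = 1 := by omega
      have haw : a + 1 < w := by omega
      have hcell : ∀ x, a ≤ x → x < w → x ≠ w - 1 ∨ lst = false →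
          pvCell (gF w h (occR w y a lst)) y x = false := by
        intro x hx1 hx2 hx3
        rw [cell_gF _ _ _ _ _ hy0 hyh (by omega) hx2]
        unfold occR
        rw [if_neg (by omega), if_pos rfl]
        rcases hx3 with hx3 | hx3
        · simp only [Bool.or_eq_false_iff, Bool.and_eq_false_iff]
          exact ⟨by simp; omega, Or.inr (by simp [hx3])⟩
        · simp [hx3]; omega
      have hnotlast : a ≠ w - 1 ∨ lst = false := by
        by_cases hl : lst = true
        · left; have := hlst hl; omega
        · right; simpa using hl
      have hnotlast1 : a + 1 ≠ w - 1 ∨ lst = false := by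
        by_cases hl : lst = true
        · left; have := hlst hl; omega
        · right; simpa using hl
      rw [PySem.List.pyRange_one_cons (by omega : a < w),
          PySem.List.pyRange_one_cons haw]
      simp only [List.foldl_cons]
      -- step at x = a: place a horizontal domino
      have hstep1 : stepAx w h y (gF w h (occR w y a lst), emps) a
          = (gF w h (occR w y (a + 2) lst), emps ++ [((a, y), (a + 1, y))]) := by
        unfold stepAx
        simp only
        rw [if_neg (by rw [hcell a le_rfl (by omega) hnotlast]; simp),
            if_pos ⟨haw, hcell (a + 1) (by omega) haw hnotlast1⟩]
        refine congrArg₂ _ ?_ rfl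
        rw [set_gF _ _ _ _ _ hy0 hyh (by omega) (by omega),
            set_gF _ _ _ _ _ hy0 hyh (by omega) haw]
        refine gF_congr (fun i j hi0 hih hj0 hjw => ?_)
        beta_reduce
        unfold occR
        cases lst <;> split_ifs <;> (try simp_all) <;> (try omega) <;>
          (congr 1 <;> simp <;> omega)
      rw [hstep1]
      -- step at x = a + 1: the cell was just occupied, skip
      have hstep2 : stepAx w h y (gF w h (occR w y (a + 2) lst), emps ++ [((a, y), (a + 1, y))]) (a + 1)
          = (gF w h (occR w y (a + 2) lst), emps ++ [((a, y), (a + 1, y))]) := by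
        have hc : pvCell (gF w h (occR w y (a + 2) lst)) y (a + 1) = true := by
          rw [cell_gF _ _ _ _ _ hy0 hyh (by omega) haw]
          unfold occR
          rw [if_neg (by omega), if_pos rfl]
          have h12 : a + 1 < a + 2 := by omega
          simp [h12]
        unfold stepAx
        simp only
        rw [if_pos hc]
      rw [hstep2, show a + 1 + 1 = a + 2 from by ring, ih (a + 2) (by omega) (by omega)]
      rw [pyRange_two_cons a _ (by omega)]
      simp

-- A's inner loop, from column w - w % 2 on: nothing (w even), skip (last column
-- occupied), or place the vertical domino into row y+1
theorem innerT (w h y : Int) (hw : 0 < w) (hy0 : 0 ≤ y) (hyh : y < h)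
    (lst : Bool) (hlst : lst = true → w % 2 = 1)
    (hPar : w % 2 = 1 → lst = false → y + 1 < h) (emps : List ((Int × Int) × (Int × Int))) :
    (PySem.List.pyRange (w - w % 2) w 1).foldl (stepAx w h y) (gF w h (occR w y (w - w % 2) lst), emps)
      = (gF w h (occR w (y + 1) 0 (!lst && decide (w % 2 = 1))),
         emps ++ (if w % 2 = 1 ∧ lst = false then [((w - 1, y), (w - 1, y + 1))] else [])) := by
  have hmod : w % 2 = 0 ∨ w % 2 = 1 := by omega
  rcases hmod with hm | hm
  · have hlf : lst = false := by
      cases lst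
      · rfl
      · exact absurd (hlst rfl) (by omega)
    subst hlf
    rw [hm, if_neg (by simp)]
    rw [sub_zero, PySem.List.pyRange_one_eq_nil le_rfl]
    simp only [List.foldl_nil, List.append_nil]
    refine congrArg₂ _ (gF_congr (fun i j hi0 hih hj0 hjw => ?_)) rfl
    beta_reduce
    unfold occR
    split_ifs <;> (try simp_all) <;> omega
  · have hw1 : 0 ≤ w - 1 := by omega
    rw [hm]
    have hrange : PySem.List.pyRange (w - 1) w 1 = [w - 1] := by
      have := PySem.List.pyRange_one_singleton (w - 1)
      simpa [sub_add_cancel] using this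
    rw [hrange]
    simp only [List.foldl_cons, List.foldl_nil]
    have hcl : pvCell (gF w h (occR w y (w - 1) lst)) y (w - 1) = lst := by
      rw [cell_gF _ _ _ _ _ hy0 hyh (by omega) (by omega)]
      unfold occR
      rw [if_neg (by omega), if_pos rfl]
      simp
    rcases Bool.eq_false_or_eq_true lst with hl | hl
    · -- last column already occupied by the vertical from row y-1: skip
      subst hl
      unfold stepAx
      simp only
      rw [if_pos (by rw [hcl]), if_neg (by rintro ⟨-, h2⟩; simp at h2)]
      refine congrArg₂ _ (gF_congr (fun i j hi0 hih hj0 hjw => ?_)) (by simp)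
      beta_reduce
      unfold occR
      split_ifs <;> (try simp_all) <;> omega
    · -- last column free: vertical domino
      subst hl
      have hyh1 : y + 1 < h := hPar hm rfl
      unfold stepAx
      simp only
      rw [if_neg (by rw [hcl]; simp), if_neg (by rintro ⟨h1, -⟩; omega)]
      have hbelow : pvCell (gF w h (occR w y (w - 1) false)) (y + 1) (w - 1) = false := by
        rw [cell_gF _ _ _ _ _ (by omega) hyh1 (by omega) (by omega)]
        unfold occR
        rw [if_neg (by omega), if_neg (by omega)]
      rw [if_pos ⟨hyh1, hbelow⟩, if_pos (by simp)]
      refine congrArg₂ _ ?_ rfl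
      rw [set_gF _ _ _ _ _ hy0 hyh (by omega) (by omega),
          set_gF _ _ _ _ _ (by omega) hyh1 (by omega) (by omega)]
      refine gF_congr (fun i j hi0 hih hj0 hjw => ?_)
      beta_reduce
      unfold occR
      split_ifs <;> (try simp_all) <;> omega

def lstF (w : Int) (k : Int) : Bool := decide (w % 2 = 1) && decide (k % 2 = 1)

-- outer loop invariant: after processing rows 0..k-1
theorem outerL (w h : Int) (hw : 0 < w) (hh : 0 < h)
    (hPre : Pre_generer_emplacements w h) :
    ∀ (k : Nat), (k : Int) ≤ h →
    (PySem.List.pyRange 0 (k : Int) 1).foldl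
        (fun st y => (PySem.List.pyRange 0 w 1).foldl (stepAx w h y) st)
        (gF w h (occR w 0 0 false), [])
      = (gF w h (occR w (k : Int) 0 (lstF w (k : Int))),
         (PySem.List.pyRange 0 (k : Int) 1).flatMap (rowOut w h)) := by
  intro k
  induction k with
  | zero =>
      intro _
      simp only [Nat.cast_zero]
      rw [PySem.List.pyRange_one_eq_nil le_rfl]
      simp [lstF]
  | succ k ih =>
      intro hk
      have hk' : (k : Int) ≤ h := by push_cast at hk ⊢; omega
      have hkh : (k : Int) < h := by push_cast at hk; omega
      have hcast : ((k + 1 : Nat) : Int) = (k : Int) + 1 := by push_cast; ring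
      rw [hcast, PySem.List.pyRange_one_succ_right (by positivity), List.foldl_append, ih hk']
      simp only [List.foldl_cons, List.foldl_nil]
      -- the row-k pass
      have hlst : lstF w (k : Int) = true → w % 2 = 1 := by
        intro hl; unfold lstF at hl; simp at hl; exact hl.1
      have hPar : w % 2 = 1 → lstF w (k : Int) = false → (k : Int) + 1 < h := by
        intro hm hl
        unfold lstF at hl
        simp [hm] at hl
        -- k is even; if k+1 = h then h is odd, contradicting Pre_
        by_contra hcon
        have hh' : (k : Int) + 1 = h := by omega
        exact hPre ⟨hw, hh, hm, by omega⟩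
      have hkp : ∃ p : Nat, (0 : Int) + 2 * (p : Int) = w - w % 2 := by
        refine ⟨((w - w % 2) / 2).toNat, ?_⟩
        omega
      obtain ⟨p, hp⟩ := hkp
      rw [innerH w h (k : Int) (by positivity) hkh (lstF w (k : Int)) hlst p 0 le_rfl hp,
          innerT w h (k : Int) hw (by positivity) hkh (lstF w (k : Int)) hlst hPar]
      refine congrArg₂ _ ?_ ?_
      · refine congrArg _ ?_
        unfold lstF
        rcases (by omega : w % 2 = 0 ∨ w % 2 = 1) with hm | hm
        · simp [hm]
        · rcases (by omega : ((k : Int)) % 2 = 0 ∨ ((k : Int)) % 2 = 1) with hk2 | hk2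
          · have e1 : ((k : Int) + 1) % 2 = 1 := by omega
            simp [hm, hk2, e1]
          · have e1 : ((k : Int) + 1) % 2 = 0 := by omega
            simp [hm, hk2, e1]
      · rw [List.flatMap_append]
        simp only [List.flatMap_cons, List.flatMap_nil, List.append_nil, List.append_assoc]
        refine congrArg _ ?_
        unfold rowOut
        rw [pyRange_horiz w hw]
        refine congrArg _ ?_
        rcases (by omega : w % 2 = 0 ∨ w % 2 = 1) with hm | hm
        · rw [if_neg (by omega), if_neg (by rintro ⟨h1, -⟩; omega)]
        · rcases Bool.eq_false_or_eq_true (lstF w (k : Int)) with hl | hl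
          · have hkodd : ¬ ((k : Int) % 2 = 0) := by
              unfold lstF at hl; simp [hm] at hl; omega
            rw [if_neg (by rintro ⟨-, h2⟩; simp [hl] at h2),
                if_neg (by rintro ⟨-, h2, -⟩; exact hkodd h2)]
          · have hkeven : (k : Int) % 2 = 0 := by
              unfold lstF at hl; simp [hm] at hl; omega
            rw [if_pos ⟨hm, hl⟩, if_pos ⟨hm, hkeven, hPar hm hl⟩]

-- a fold whose body is the identity
theorem foldl_id {α β : Type} (f : α → β → α) (hf : ∀ a b, f a b = a) :
    ∀ (l : List β) (a : α), l.foldl f a = a := by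
  intro l
  induction l with
  | nil => intro a; rfl
  | cons x xs ih => intro a; rw [List.foldl_cons, hf]; exact ih a

-- B's row body appends exactly rowOut
theorem altRow (w h y : Int) (hw : 0 < w) (hy0 : 0 ≤ y)
    (emps : List ((Int × Int) × (Int × Int))) :
    (if 0 < w ∧ PySem.Int.mod w 2 = 1 ∧ PySem.Int.mod y 2 = 0 then
       if y + 1 < h then
         ((PySem.List.pyRange 0 (w - 1) 2).foldl
             (fun acc x => acc ++ [((x, y), (x + 1, y))]) emps)
           ++ [((w - 1, y), (w - 1, y + 1))]
       else (PySem.List.pyRange 0 (w - 1) 2).foldl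
             (fun acc x => acc ++ [((x, y), (x + 1, y))]) emps
     else (PySem.List.pyRange 0 (w - 1) 2).foldl
             (fun acc x => acc ++ [((x, y), (x + 1, y))]) emps)
      = emps ++ rowOut w h y := by
  rw [PySem.List.foldl_append_singleton_eq_map]
  unfold rowOut
  rw [PySem.Int.mod_eq_emod_of_pos (by norm_num : (0:Int) < 2), PySem.Int.mod_eq_emod_of_pos (by norm_num : (0:Int) < 2)]
  by_cases h1 : w % 2 = 1 ∧ y % 2 = 0
  · rw [if_pos ⟨hw, h1.1, h1.2⟩]
    by_cases h2 : y + 1 < h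
    · rw [if_pos h2, if_pos ⟨h1.1, h1.2, h2⟩]
      simp
    · rw [if_neg h2, if_neg (by rintro ⟨-, -, h3⟩; exact h2 h3)]
      simp
  · rw [if_neg (by rintro ⟨-, h2, h3⟩; exact h1 ⟨h2, h3⟩),
        if_neg (by rintro ⟨h2, h3, -⟩; exact h1 ⟨h2, h3⟩)]
    simp

-- B computes the flatMap of rowOut
theorem altEq (w h : Int) (hw : 0 < w) :
    generer_emplacements_alt w h = (PySem.List.pyRange 0 h 1).flatMap (rowOut w h) := by
  unfold generer_emplacements_alt
  have hbody : ∀ (emps : List ((Int × Int) × (Int × Int))) (y : Int), y ∈ PySem.List.pyRange 0 h 1 →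
      (fun emplacements y =>
        let emplacements :=
          (PySem.List.pyRange 0 (w - 1) 2).foldl
            (fun acc x => acc ++ [((x, y), (x + 1, y))]) emplacements
        if 0 < w ∧ PySem.Int.mod w 2 = 1 ∧ PySem.Int.mod y 2 = 0 then
          if y + 1 < h then
            emplacements ++ [((w - 1, y), (w - 1, y + 1))]
          else emplacements
        else emplacements) emps y = emps ++ rowOut w h y := by
    intro emps y hy
    rw [PySem.List.mem_pyRange_one] at hy
    have := altRow w h y hw hy.1 emps
    simp only at this ⊢
    split_ifs at this ⊢ <;> simp_all
  calc (PySem.List.pyRange 0 h 1).foldl _ []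
      = (PySem.List.pyRange 0 h 1).foldl (fun emps y => emps ++ rowOut w h y) [] := by
        apply PySem.List.foldl_congr_mem
        intro acc y hy
        exact hbody acc y hy
    _ = (PySem.List.pyRange 0 h 1).flatMap (rowOut w h) := by
        rw [PySem.List.foldl_append_eq_flatMap]
        simp

-- ===== VERDICT (by name: the statement is the Claim_ definition above) =====
theorem generer_emplacements_spec : Claim_equal_generer_emplacements := by
  intro w h _ hPre
  unfold Spec_generer_emplacements
  by_cases hh : 0 < h
  · by_cases hw : 0 < w
    · -- main case
      unfold generer_emplacements
      simp only
      have hgrid : ((PySem.List.pyRange 0 h 1).map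
          (fun _ => (PySem.List.pyRange 0 w 1).map (fun _ => false)))
          = gF w h (occR w 0 0 false) := by
        refine List.map_congr_left (fun i hi => List.map_congr_left (fun j hj => ?_))
        rw [PySem.List.mem_pyRange_one] at hi hj
        unfold occR
        split_ifs <;> first | rfl | omega | (simp <;> omega)
      rw [hgrid]
      have hcast : ((h.toNat : Int)) = h := by omega
      have := outerL w h hw hh hPre h.toNat (by omega)
      rw [hcast] at this
      rw [this, altEq w h hw]
  -- degenerate cases: no rows (h ≤ 0) or no columns (w ≤ 0): both return []
    · unfold generer_emplacements generer_emplacements_alt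
      simp only
      have hwr : PySem.List.pyRange 0 w 1 = [] := PySem.List.pyRange_one_eq_nil (by omega)
      have hwr2 : PySem.List.pyRange 0 (w - 1) 2 = [] := pyRange_two_nil _ _ (by omega)
      rw [foldl_id _ (by intro a b; rw [hwr]; rfl),
          foldl_id _ (by
            intro a b
            simp only [hwr2, List.foldl_nil]
            rw [if_neg (by rintro ⟨h1, -⟩; exact hw h1)])]
  · unfold generer_emplacements generer_emplacements_alt
    have hhr : PySem.List.pyRange 0 h 1 = [] := PySem.List.pyRange_one_eq_nil (by omega)
    rw [hhr]
    rfl
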